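-- pv_equiv track=rewrite | github.com/wattgod/athlete-coaching-system | scripts/create_profile_from_questionnaire.py | infer_schedule
-- ===== SOURCE A (Python) =====
-- def infer_schedule(hours: int, long_days: list, interval_days: list, off_days: list) -> dict:
--     """Build schedule from questionnaire responses."""
--     schedule = {}
--     days = ['monday', 'tuesday', 'wednesday', 'thursday', 'friday', 'saturday', 'sunday']
--
--     for day in days:
--         if day in off_days:
--             schedule[day] = "rest"
--         elif day in long_days:
--             schedule[day] = "3-5hrs"
--         elif day in interval_days:
--             schedule[day] = "60-90min intensity"
--         else:
--             schedule[day] = "60-90min easy"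
--
--     return schedule
-- ===== SOURCE B (Python) =====
-- def infer_schedule(hours: int, long_days: list, interval_days: list, off_days: list) -> dict:
--     """Build schedule from questionnaire responses."""
--     days = ['monday', 'tuesday', 'wednesday', 'thursday', 'friday', 'saturday', 'sunday']
--     schedule = {day: "60-90min easy" for day in days}
--     for day in interval_days:
--         if day in schedule:
--             schedule[day] = "60-90min intensity"
--     for day in long_days:
--         if day in schedule:
--             schedule[day] = "3-5hrs"
--     for day in off_days:
--         if day in schedule:
--             schedule[day] = "rest"
--     return schedule
-- ===== Notes on version B (the rewrite author's own statement) =====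
-- stated objective: alternative
-- what changed: Instead of testing each of the 7 weekdays against all three lists inside one branching loop, B seeds the dict with all weekdays at the easy default and then applies overrides by iterating the input lists in reverse priority (interval, long, off), guarded by membership in the dict.
import Mathlib
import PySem

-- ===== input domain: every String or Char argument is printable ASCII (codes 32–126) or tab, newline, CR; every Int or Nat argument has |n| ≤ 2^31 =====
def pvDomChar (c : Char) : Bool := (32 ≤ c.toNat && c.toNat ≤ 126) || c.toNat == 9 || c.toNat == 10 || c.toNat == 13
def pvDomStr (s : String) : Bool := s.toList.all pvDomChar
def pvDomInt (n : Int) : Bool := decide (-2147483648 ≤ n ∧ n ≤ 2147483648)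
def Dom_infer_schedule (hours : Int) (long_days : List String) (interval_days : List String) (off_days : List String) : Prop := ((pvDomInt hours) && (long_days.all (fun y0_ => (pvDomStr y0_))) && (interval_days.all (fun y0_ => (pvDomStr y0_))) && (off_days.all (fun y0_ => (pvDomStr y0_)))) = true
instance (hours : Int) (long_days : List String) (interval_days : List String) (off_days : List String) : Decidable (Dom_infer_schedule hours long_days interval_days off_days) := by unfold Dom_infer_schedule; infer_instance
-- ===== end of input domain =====

-- B seeds the dict with all weekdays at the easy default and applies overrides per input list
-- in reverse priority order (alternative decomposition, same cost); return value only.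

-- ===== PORT A =====
def pvDays : List String := ["monday", "tuesday", "wednesday", "thursday", "friday", "saturday", "sunday"]

def infer_schedule (hours : Int) (long_days : List String) (interval_days : List String) (off_days : List String) : List (String × String) :=
  (pvDays.foldl (fun schedule day =>
      if day ∈ off_days then schedule.insert day "rest"
      else if day ∈ long_days then schedule.insert day "3-5hrs"
      else if day ∈ interval_days then schedule.insert day "60-90min intensity"
      else schedule.insert day "60-90min easy")
    (PySem.Dict.empty : PySem.Dict String String)).items

-- ===== PORT B =====
def infer_schedule_alt (hours : Int) (long_days : List String) (interval_days : List String) (off_days : List String) : List (String × String) :=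
  let base := pvDays.foldl (fun d day => d.insert day "60-90min easy")
    (PySem.Dict.empty : PySem.Dict String String)
  let d1 := interval_days.foldl (fun d day => if d.contains day then d.insert day "60-90min intensity" else d) base
  let d2 := long_days.foldl (fun d day => if d.contains day then d.insert day "3-5hrs" else d) d1
  let d3 := off_days.foldl (fun d day => if d.contains day then d.insert day "rest" else d) d2
  d3.items

-- ===== PRECONDITION & SPEC =====
def Spec_infer_schedule (hours : Int) (long_days : List String) (interval_days : List String) (off_days : List String) (out : List (String × String)) : Prop := out = infer_schedule_alt hours long_days interval_days off_days
instance (hours : Int) (long_days : List String) (interval_days : List String) (off_days : List String) (out : List (String × String)) : Decidable (Spec_infer_schedule hours long_days interval_days off_days out) := by unfold Spec_infer_schedule; infer_instance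

-- ===== CLAIM (what is proved, stated in full; the proofs are below) =====
def Claim_equal_infer_schedule : Prop := ∀ (hours : Int) (long_days : List String) (interval_days : List String) (off_days : List String), Dom_infer_schedule hours long_days interval_days off_days → Spec_infer_schedule hours long_days interval_days off_days (infer_schedule hours long_days interval_days off_days)

-- ===== LEMMAS AND PROOFS =====

-- Folding fresh inserts over a Nodup key list appends the corresponding pairs.
theorem items_foldl_insert (f : String → String) :
    ∀ (L : List String) (d : PySem.Dict String String), L.Nodup →
      (∀ k ∈ L, d.contains k = false) →
      (L.foldl (fun d day => d.insert day (f day)) d).items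
        = d.items ++ L.map (fun k => (k, f k)) := by
  intro L
  induction L with
  | nil => intro d _ _; simp
  | cons x xs ih =>
    intro d hnd hfree
    have hx : d.contains x = false := hfree x (by simp)
    have h1 : ∀ k ∈ xs, (d.insert x (f x)).contains k = false := by
      intro k hk
      rw [PySem.Dict.contains_insert]
      have : k ≠ x := fun h => (List.nodup_cons.mp hnd).1 (h ▸ hk)
      simp [this, hfree k (List.mem_cons_of_mem _ hk)]
    simp only [List.foldl_cons]
    rw [ih _ (List.nodup_cons.mp hnd).2 h1,
        PySem.Dict.items_insert_of_not_contains _ _ hx]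
    simp

-- Key-Nodup is preserved by any step that builds on insert or leaves the dict alone.
theorem nodup_keys_foldl (step : PySem.Dict String String → String → PySem.Dict String String)
    (hstep : ∀ d x, d.keys.Nodup → (step d x).keys.Nodup) :
    ∀ (L : List String) (d : PySem.Dict String String), d.keys.Nodup →
      (L.foldl step d).keys.Nodup := by
  intro L
  induction L with
  | nil => intro d h; simpa using h
  | cons x xs ih => intro d h; exact ih _ (hstep d x h)

-- A contains-guarded overwrite fold rewrites exactly the entries whose key occurs in xs.
theorem items_foldl_override (v : String) :
    ∀ (xs : List String) (d : PySem.Dict String String), d.keys.Nodup →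
      (xs.foldl (fun d day => if d.contains day then d.insert day v else d) d).items
        = d.items.map (fun p => if p.1 ∈ xs then (p.1, v) else p) := by
  intro xs
  induction xs with
  | nil => intro d _; simp
  | cons x xs ih =>
    intro d hnd
    simp only [List.foldl_cons]
    by_cases hc : d.contains x = true
    · rw [if_pos hc, ih _ (PySem.Dict.nodup_keys_insert _ _ _ hnd),
          PySem.Dict.items_insert_of_contains _ _ hc, List.map_map]
      apply List.map_congr_left
      intro p _
      by_cases he : p.1 = x
      · subst he
        by_cases hm : p.1 ∈ xs <;> simp [hm]
      · have : (p.1 == x) = false := by simp [he]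
        simp [Function.comp, this, he]
    · rw [if_neg hc, ih _ hnd]
      apply List.map_congr_left
      intro p hp
      have hne : p.1 ≠ x := by
        intro he
        have hg : d.get? p.1 = some p.2 :=
          PySem.Dict.get?_of_mem_items d (by simpa using hp) hnd
        have : d.get? x = none :=
          (PySem.Dict.get?_eq_none_iff_contains d x).mpr (by simpa using hc)
        rw [he] at hg
        simp [this] at hg
      simp [hne]

theorem pvDays_nodup : pvDays.Nodup := by decide

-- A's fold computes the map of the combined branch value over the weekdays.
theorem infer_schedule_eq_map (hours : Int) (long_days interval_days off_days : List String) :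
    infer_schedule hours long_days interval_days off_days
      = pvDays.map (fun day => (day,
          if day ∈ off_days then "rest"
          else if day ∈ long_days then "3-5hrs"
          else if day ∈ interval_days then "60-90min intensity"
          else "60-90min easy")) := by
  unfold infer_schedule
  have hbody : (fun (schedule : PySem.Dict String String) day =>
      if day ∈ off_days then schedule.insert day "rest"
      else if day ∈ long_days then schedule.insert day "3-5hrs"
      else if day ∈ interval_days then schedule.insert day "60-90min intensity"
      else schedule.insert day "60-90min easy")
    = (fun (schedule : PySem.Dict String String) day => schedule.insert day
        (if day ∈ off_days then "rest"
         else if day ∈ long_days then "3-5hrs"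
         else if day ∈ interval_days then "60-90min intensity"
         else "60-90min easy")) := by
    funext schedule day
    split_ifs <;> rfl
  rw [hbody, items_foldl_insert _ pvDays PySem.Dict.empty pvDays_nodup
        (by intro k _; exact PySem.Dict.contains_empty k)]
  simp
  rfl

-- ===== VERDICT (by name: the statement is the Claim_ definition above) =====
theorem infer_schedule_spec : Claim_equal_infer_schedule := by
  intro hours long_days interval_days off_days _
  unfold Spec_infer_schedule infer_schedule_alt
  have hbase := items_foldl_insert (fun _ => "60-90min easy") pvDays
      PySem.Dict.empty pvDays_nodup (by intro k _; exact PySem.Dict.contains_empty k)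
  have hbasend : (pvDays.foldl (fun d day => d.insert day "60-90min easy")
      (PySem.Dict.empty : PySem.Dict String String)).keys.Nodup :=
    nodup_keys_foldl _ (fun d x h => PySem.Dict.nodup_keys_insert d x _ h) pvDays _
      PySem.Dict.nodup_keys_empty
  have hguard : ∀ (v : String) (d : PySem.Dict String String) (x : String), d.keys.Nodup →
      ((if d.contains x then d.insert x v else d)).keys.Nodup := by
    intro v d x h
    by_cases hc : d.contains x = true
    · simpa [hc] using PySem.Dict.nodup_keys_insert d x v h
    · simpa [hc] using h
  have hnd1 := nodup_keys_foldl _ (hguard "60-90min intensity") interval_days _ hbasend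
  have hnd2 := nodup_keys_foldl _ (hguard "3-5hrs") long_days _ hnd1
  rw [items_foldl_override "rest" off_days _ hnd2,
      items_foldl_override "3-5hrs" long_days _ hnd1,
      items_foldl_override "60-90min intensity" interval_days _ hbasend,
      hbase, infer_schedule_eq_map]
  simp only [show (PySem.Dict.empty : PySem.Dict String String).items = [] from rfl,
      List.nil_append, List.map_map]
  apply List.map_congr_left
  intro day _
  by_cases h1 : day ∈ off_days <;> by_cases h2 : day ∈ long_days <;>
    by_cases h3 : day ∈ interval_days <;>
    simp [Function.comp, h1, h2, h3]
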